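-- pv_equiv track=rewrite | github.com/luzgabriel/pymoku | pymoku/pymoku.py | get_sequences_in_array
-- ===== SOURCE A (Python) =====
-- EMPTY = "[ ]"
--
-- def get_sequences_in_array(array):
-- 	sequences = []
-- 	tmp_seq = []
-- 	tmp_opening = 0
-- 	for i, item in enumerate(array):
-- 		if i > 0:
-- 			last_item = array[i-1]
-- 			if item != EMPTY:
-- 				if last_item != item:
-- 					if last_item == EMPTY:
-- 						tmp_opening = 1
-- 						tmp_seq.append(item)
-- 					else:
-- 						if(len(tmp_seq) > 1):
-- 							sequences.append([tmp_seq[0], tmp_opening, len(tmp_seq)])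
-- 						tmp_seq = []
-- 						tmp_opening = 0
-- 				else:
-- 					if(len(tmp_seq) < 1):
-- 						tmp_seq.append(last_item)
-- 					tmp_seq.append(item)
-- 			elif last_item != item:
-- 				if len(tmp_seq) > 1:
-- 					sequences.append([tmp_seq[0], tmp_opening+1, len(tmp_seq)])
-- 				tmp_seq = []
-- 				tmp_opening = 0
-- 	if len(tmp_seq) > 1:
-- 		sequences.append([tmp_seq[0], tmp_opening, len(tmp_seq)])
-- 	return sequences
-- ===== SOURCE B (Python) =====
-- EMPTY = "[ ]"
--
-- def get_sequences_in_array(array):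
--     # Pass 1: split into maximal runs of equal consecutive elements.
--     runs = []
--     for x in array:
--         if runs and runs[-1][0] == x:
--             runs[-1][1] += 1
--         else:
--             runs.append([x, 1])
--     # Pass 2: emit [value, opening, length] for non-EMPTY runs of length >= 2.
--     sequences = []
--     for j, (v, n) in enumerate(runs):
--         if v != EMPTY and n >= 2:
--             opening = 0
--             if j > 0 and runs[j - 1][0] == EMPTY:
--                 opening += 1
--             if j + 1 < len(runs) and runs[j + 1][0] == EMPTY:
--                 opening += 1
--             sequences.append([v, opening, n])
--     return sequences
-- ===== Notes on version B (the rewrite author's own statement) =====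
-- stated objective: simpler
-- what changed: Replaced A's single-pass five-branch state machine (tmp_seq buffer, tmp_opening flag, flush logic in three places) by run-length encoding the array first and then emitting [value, opening, length] per non-EMPTY run of length >= 2 with a direct look at the neighboring runs.
import Mathlib
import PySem

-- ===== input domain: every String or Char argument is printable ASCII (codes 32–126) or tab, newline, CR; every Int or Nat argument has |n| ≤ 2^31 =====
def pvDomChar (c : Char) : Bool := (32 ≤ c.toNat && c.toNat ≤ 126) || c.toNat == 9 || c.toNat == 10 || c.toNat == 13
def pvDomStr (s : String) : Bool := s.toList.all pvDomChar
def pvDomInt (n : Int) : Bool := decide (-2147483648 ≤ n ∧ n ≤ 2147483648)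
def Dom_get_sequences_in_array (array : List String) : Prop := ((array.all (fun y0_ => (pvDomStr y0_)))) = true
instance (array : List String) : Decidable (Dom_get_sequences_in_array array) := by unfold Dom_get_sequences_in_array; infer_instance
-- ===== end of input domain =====

-- B replaces A's single-pass five-branch state machine by run-length encoding the array
-- first and then emitting one triple per non-EMPTY run of length >= 2 (objective: simpler).

-- ===== PORT A =====
def pvEMPTY : String := "[ ]"

-- the loop body of A (state = (sequences, tmp_seq, tmp_opening)); literal transliteration
def stepA (array : List String)
    (st : List (String × Int × Int) × List String × Int) (p : Int × String) :
    List (String × Int × Int) × List String × Int :=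
  let sequences := st.1
  let tmp_seq := st.2.1
  let tmp_opening := st.2.2
  let i := p.1
  let item := p.2
  if i > 0 then
    let last_item := PySem.List.pyGetD array (i - 1) ""
    if item ≠ pvEMPTY then
      if last_item ≠ item then
        if last_item = pvEMPTY then
          (sequences, tmp_seq ++ [item], 1)
        else
          if tmp_seq.length > 1 then
            (sequences ++ [(PySem.List.pyGetD tmp_seq 0 "", tmp_opening, (tmp_seq.length : Int))], [], 0)
          else
            (sequences, [], 0)
      else
        let tmp_seq2 := if tmp_seq.length < 1 then tmp_seq ++ [last_item] else tmp_seq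
        (sequences, tmp_seq2 ++ [item], tmp_opening)
    else
      if last_item ≠ item then
        if tmp_seq.length > 1 then
          (sequences ++ [(PySem.List.pyGetD tmp_seq 0 "", tmp_opening + 1, (tmp_seq.length : Int))], [], 0)
        else
          (sequences, [], 0)
      else
        st
  else
    st

def get_sequences_in_array (array : List String) : List (String × Int × Int) :=
  let st := (PySem.List.enumerate array).foldl (stepA array) ([], [], 0)
  if st.2.1.length > 1 then
    st.1 ++ [(PySem.List.pyGetD st.2.1 0 "", st.2.2, (st.2.1.length : Int))]
  else
    st.1

-- ===== PORT B =====
-- pass 1 body: extend the run list by one element (runs[-1][1] += 1 or append a new run)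
def addRun (runs : List (String × Int)) (x : String) : List (String × Int) :=
  match runs.getLast? with
  | some vn => if vn.1 = x then runs.dropLast ++ [(vn.1, vn.2 + 1)] else runs ++ [(x, 1)]
  | none => runs ++ [(x, 1)]

-- pass 2 body: emit [v, opening, n] for a non-EMPTY run of length ≥ 2
def stepB (runs : List (String × Int))
    (sequences : List (String × Int × Int)) (p : Int × (String × Int)) :
    List (String × Int × Int) :=
  let j := p.1
  let v := p.2.1
  let n := p.2.2
  if v ≠ pvEMPTY ∧ n ≥ 2 then
    let o1 : Int := if j > 0 ∧ (PySem.List.pyGetD runs (j - 1) ("", 0)).1 = pvEMPTY then 1 else 0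
    let o2 : Int := if j + 1 < (runs.length : Int) ∧ (PySem.List.pyGetD runs (j + 1) ("", 0)).1 = pvEMPTY then 1 else 0
    sequences ++ [(v, o1 + o2, n)]
  else
    sequences

def get_sequences_in_array_alt (array : List String) : List (String × Int × Int) :=
  let runs := array.foldl addRun []
  (PySem.List.enumerate runs).foldl (stepB runs) []

-- ===== PRECONDITION & SPEC =====
def Spec_get_sequences_in_array (array : List String) (out : List (String × Int × Int)) : Prop := out = get_sequences_in_array_alt array
instance (array : List String) (out : List (String × Int × Int)) : Decidable (Spec_get_sequences_in_array array out) := by unfold Spec_get_sequences_in_array; infer_instance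

-- ===== CLAIM (what is proved, stated in full; the proofs are below) =====
def Claim_equal_get_sequences_in_array : Prop := ∀ (array : List String), Dom_get_sequences_in_array array → Spec_get_sequences_in_array array (get_sequences_in_array array)

-- ===== LEMMAS AND PROOFS =====

-- A's loop body with the previous element given directly (proof-side view of stepA)
def pairStep (st : List (String × Int × Int) × List String × Int)
    (last_item item : String) : List (String × Int × Int) × List String × Int :=
  let sequences := st.1
  let tmp_seq := st.2.1
  let tmp_opening := st.2.2
  if item ≠ pvEMPTY then
    if last_item ≠ item then
      if last_item = pvEMPTY then
        (sequences, tmp_seq ++ [item], 1)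
      else
        if tmp_seq.length > 1 then
          (sequences ++ [(PySem.List.pyGetD tmp_seq 0 "", tmp_opening, (tmp_seq.length : Int))], [], 0)
        else
          (sequences, [], 0)
    else
      let tmp_seq2 := if tmp_seq.length < 1 then tmp_seq ++ [last_item] else tmp_seq
      (sequences, tmp_seq2 ++ [item], tmp_opening)
  else
    if last_item ≠ item then
      if tmp_seq.length > 1 then
        (sequences ++ [(PySem.List.pyGetD tmp_seq 0 "", tmp_opening + 1, (tmp_seq.length : Int))], [], 0)
      else
        (sequences, [], 0)
    else
      st

def loopA (st : List (String × Int × Int) × List String × Int) :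
    String → List String → List (String × Int × Int) × List String × Int
  | _, [] => st
  | prev, x :: xs => loopA (pairStep st prev x) x xs

def finishA (st : List (String × Int × Int) × List String × Int) : List (String × Int × Int) :=
  if st.2.1.length > 1 then
    st.1 ++ [(PySem.List.pyGetD st.2.1 0 "", st.2.2, (st.2.1.length : Int))]
  else
    st.1

-- B-side proof views
def buildRuns : String → Int → List String → List (String × Int)
  | v, n, [] => [(v, n)]
  | v, n, x :: xs => if v = x then buildRuns v (n + 1) xs else (v, n) :: buildRuns x 1 xs

def headIsEmpty : List (String × Int) → Bool
  | (w, _) :: _ => w == pvEMPTY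
  | [] => false

def emitRec : Bool → List (String × Int) → List (String × Int × Int)
  | _, [] => []
  | p, (v, n) :: rs =>
    (if v ≠ pvEMPTY ∧ n ≥ 2 then
       [(v, (if p then (1 : Int) else 0) + (if headIsEmpty rs then 1 else 0), n)]
     else []) ++ emitRec (v == pvEMPTY) rs

def lastIsEmpty (pre : List (String × Int)) : Bool :=
  match pre.getLast? with
  | some vn => vn.1 == pvEMPTY
  | none => false

lemma stepA_eq_pairStep (array : List String) (st) (i : Int) (item : String)
    (hi : i > 0) (h : PySem.List.pyGetD array (i - 1) "" = last_item) :
    stepA array st (i, item) = pairStep st last_item item := by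
  simp [stepA, pairStep, hi, h]

lemma foldA (suf : List String) : ∀ (pre : List String) (lastv : String) (st),
    (PySem.List.enumerate suf ((pre.length + 1 : Nat) : Int)).foldl
        (stepA ((pre ++ [lastv]) ++ suf)) st
      = loopA st lastv suf := by
  induction suf with
  | nil => intro pre lastv st; simp [PySem.List.enumerate, loopA]
  | cons x xs ih =>
    intro pre lastv st
    rw [PySem.List.enumerate_cons, List.foldl_cons]
    rw [stepA_eq_pairStep _ _ _ _ (by positivity)
      (last_item := lastv)
      (by
        have : ((pre.length + 1 : Nat) : Int) - 1 = ((pre.length : Nat) : Int) := by push_cast; ring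
        rw [this, PySem.List.pyGetD_natCast]
        simp [List.getD, List.getElem?_append_right, List.getElem?_append_left])]
    have hassoc : (pre ++ [lastv]) ++ x :: xs = ((pre ++ [lastv]) ++ [x]) ++ xs := by simp
    have hlen : ((pre.length + 1 : Nat) : Int) + 1 = (((pre ++ [lastv]).length + 1 : Nat) : Int) := by
      simp
    rw [hassoc, hlen, ih (pre ++ [lastv]) x (pairStep st lastv x)]
    rfl

lemma A_cons (a0 : String) (rest : List String) :
    get_sequences_in_array (a0 :: rest) = finishA (loopA ([], [], 0) a0 rest) := by
  have h0 : stepA (a0 :: rest) ([], [], 0) (0, a0) = ([], [], 0) := by simp [stepA]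
  have := foldA rest [] a0 ([], [], 0)
  simp only [List.nil_append, List.singleton_append, List.length_nil] at this
  simp only [get_sequences_in_array, finishA, PySem.List.enumerate_cons, List.foldl_cons, h0]
  rw [show ((0 : Int) + 1) = ((0 + 1 : Nat) : Int) by norm_num, this]

lemma runs_fold (xs : List String) : ∀ (rs : List (String × Int)) (v : String) (n : Int),
    List.foldl addRun (rs ++ [(v, n)]) xs = rs ++ buildRuns v n xs := by
  induction xs with
  | nil => intro rs v n; simp [buildRuns]
  | cons x xs ih =>
    intro rs v n
    rw [List.foldl_cons]
    by_cases hvx : v = x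
    · have : addRun (rs ++ [(v, n)]) x = rs ++ [(v, n + 1)] := by
        simp [addRun, hvx]
      rw [this, ih, buildRuns, if_pos hvx]
    · have : addRun (rs ++ [(v, n)]) x = (rs ++ [(v, n)]) ++ [(x, 1)] := by
        simp [addRun, hvx]
      rw [this, ih, buildRuns, if_neg hvx]
      simp

lemma foldB (suf : List (String × Int)) : ∀ (pre : List (String × Int)) (acc),
    (PySem.List.enumerate suf ((pre.length : Nat) : Int)).foldl (stepB (pre ++ suf)) acc
      = acc ++ emitRec (lastIsEmpty pre) suf := by
  induction suf with
  | nil => intro pre acc; simp [PySem.List.enumerate, emitRec]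
  | cons vn rs ih =>
    intro pre acc
    obtain ⟨v, n⟩ := vn
    rw [PySem.List.enumerate_cons, List.foldl_cons]
    have ho1 : (if ((pre.length : Nat) : Int) > 0 ∧ (PySem.List.pyGetD (pre ++ (v, n) :: rs) (((pre.length : Nat) : Int) - 1) ("", 0)).1 = pvEMPTY then (1 : Int) else 0)
        = (if lastIsEmpty pre then (1 : Int) else 0) := by
      by_cases hpre : pre = []
      · subst hpre; simp [lastIsEmpty]
      · have hlen : 0 < pre.length := List.length_pos_iff.mpr hpre
        have h1 : ((pre.length : Nat) : Int) - 1 = ((pre.length - 1 : Nat) : Int) := by omega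
        have hget : (PySem.List.pyGetD (pre ++ (v, n) :: rs) (((pre.length : Nat) : Int) - 1) ("", 0))
            = pre.getLast hpre := by
          rw [h1, PySem.List.pyGetD_natCast]
          rw [List.getD_eq_getElem?_getD, List.getElem?_append_left (by omega)]
          rw [List.getLast_eq_getElem]
          simp [List.getElem?_eq_getElem (by omega : pre.length - 1 < pre.length)]
        have hlast : lastIsEmpty pre = ((pre.getLast hpre).1 == pvEMPTY) := by
          unfold lastIsEmpty
          rw [List.getLast?_eq_some_getLast hpre]
        rw [hget, hlast]
        by_cases he : (pre.getLast hpre).1 = pvEMPTY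
        · simp [he, hlen]
        · simp [he, hlen]
    have ho2 : (if ((pre.length : Nat) : Int) + 1 < (((pre ++ (v, n) :: rs).length : Nat) : Int) ∧ (PySem.List.pyGetD (pre ++ (v, n) :: rs) (((pre.length : Nat) : Int) + 1) ("", 0)).1 = pvEMPTY then (1 : Int) else 0)
        = (if headIsEmpty rs then (1 : Int) else 0) := by
      cases rs with
      | nil =>
        have : ¬ (((pre.length : Nat) : Int) + 1 < (((pre ++ [(v, n)]).length : Nat) : Int)) := by
          simp
        simp [this, headIsEmpty]
      | cons wm rs' =>
        obtain ⟨w, m⟩ := wm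
        have hlt : (((pre.length : Nat) : Int) + 1 < (((pre ++ (v, n) :: (w, m) :: rs').length : Nat) : Int)) := by
          simp
        have h1 : ((pre.length : Nat) : Int) + 1 = ((pre.length + 1 : Nat) : Int) := by omega
        have hget : (PySem.List.pyGetD (pre ++ (v, n) :: (w, m) :: rs') (((pre.length : Nat) : Int) + 1) ("", 0)) = (w, m) := by
          rw [h1, PySem.List.pyGetD_natCast]
          rw [List.getD_eq_getElem?_getD, List.getElem?_append_right (by omega)]
          simp
        rw [hget]
        by_cases he : w = pvEMPTY
        · simp [he, hlt, headIsEmpty]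
        · simp [he, hlt, headIsEmpty]
    have hstep : stepB (pre ++ (v, n) :: rs) acc ((pre.length : Int), (v, n))
        = acc ++ (if v ≠ pvEMPTY ∧ n ≥ 2 then
            [(v, (if lastIsEmpty pre then (1 : Int) else 0) + (if headIsEmpty rs then 1 else 0), n)]
          else []) := by
      by_cases hc : v ≠ pvEMPTY ∧ n ≥ 2
      · simp only [stepB]
        rw [if_pos hc, if_pos hc]
        rw [ho1, ho2]
      · simp only [stepB]
        rw [if_neg hc, if_neg hc, List.append_nil]
    rw [hstep]
    have h1 : ((pre.length : Nat) : Int) + 1 = (((pre ++ [(v, n)]).length : Nat) : Int) := by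
      simp
    have hassoc : pre ++ (v, n) :: rs = (pre ++ [(v, n)]) ++ rs := by simp
    rw [hassoc, h1, ih (pre ++ [(v, n)])]
    have hlast : lastIsEmpty (pre ++ [(v, n)]) = (v == pvEMPTY) := by
      simp [lastIsEmpty]
    rw [hlast, emitRec]
    simp

lemma B_cons (a0 : String) (rest : List String) :
    get_sequences_in_array_alt (a0 :: rest) = emitRec false (buildRuns a0 1 rest) := by
  have hr : List.foldl addRun [] (a0 :: rest) = buildRuns a0 1 rest := by
    rw [List.foldl_cons]
    have : addRun [] a0 = [] ++ [(a0, 1)] := by simp [addRun]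
    rw [this, runs_fold rest [] a0 1]
    simp
  simp only [get_sequences_in_array_alt, hr]
  have := foldB (buildRuns a0 1 rest) [] []
  simpa [lastIsEmpty] using this

-- the A-side loop state corresponding to a trailing run of length ℓ of value v,
-- preceded by EMPTY iff p
def tmpOf (v : String) (ℓ : Nat) (p : Bool) : List String :=
  if ℓ = 1 ∧ p = false then [] else List.replicate ℓ v

def opOf (p : Bool) : Int := if p then 1 else 0

lemma tmpOf_big (v : String) (ℓ : Nat) (p : Bool) (h2 : 2 ≤ ℓ) :
    tmpOf v ℓ p = List.replicate ℓ v := by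
  unfold tmpOf
  rw [if_neg (by omega)]

lemma length_tmpOf_le (v : String) (ℓ : Nat) (p : Bool) (h : ℓ ≤ 1) :
    (tmpOf v ℓ p).length ≤ 1 := by
  unfold tmpOf
  split <;> simp <;> omega

lemma finishA_replicate (seqs : List (String × Int × Int)) (v : String) (ℓ : Nat) (op : Int)
    (h2 : 2 ≤ ℓ) :
    finishA (seqs, List.replicate ℓ v, op) = seqs ++ [(v, op, (ℓ : Int))] := by
  unfold finishA
  rw [if_pos (by simp; omega)]
  have hv : PySem.List.pyGetD (List.replicate ℓ v) 0 "" = v := by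
    obtain ⟨k, rfl⟩ : ∃ k, ℓ = k + 1 := ⟨ℓ - 1, by omega⟩
    rw [List.replicate_succ]
    simp [PySem.List.pyGetD_zero_cons]
  simp [hv]

lemma finishA_small (seqs : List (String × Int × Int)) (ts : List String) (op : Int)
    (h : ts.length ≤ 1) :
    finishA (seqs, ts, op) = seqs := by
  unfold finishA
  rw [if_neg (by simp; omega)]

lemma headIsEmpty_buildRuns (x : String) (l : List String) :
    ∀ (n : Int), headIsEmpty (buildRuns x n l) = (x == pvEMPTY) := by
  induction l with
  | nil => intro n; simp [buildRuns, headIsEmpty]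
  | cons y ys ih =>
    intro n
    rw [buildRuns]
    by_cases h : x = y
    · rw [if_pos h, ih]
    · rw [if_neg h, headIsEmpty]

lemma pairStep_extend (v : String) (ℓ : Nat) (p : Bool) (seqs : List (String × Int × Int))
    (op : Int) (hv : v ≠ pvEMPTY) (hℓ : 1 ≤ ℓ) :
    pairStep (seqs, tmpOf v ℓ p, op) v v = (seqs, tmpOf v (ℓ + 1) p, op) := by
  simp only [pairStep]
  rw [if_pos hv, if_neg (by simp)]
  by_cases h1 : ℓ = 1 ∧ p = false
  · have ht : tmpOf v ℓ p = [] := by unfold tmpOf; rw [if_pos h1]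
    have ht2 : tmpOf v (ℓ + 1) p = [v, v] := by
      unfold tmpOf
      rw [if_neg (by omega)]
      rw [show ℓ + 1 = 2 by omega]
      rfl
    simp [ht, ht2]
  · have ht : tmpOf v ℓ p = List.replicate ℓ v := by unfold tmpOf; rw [if_neg h1]
    have ht2 : tmpOf v (ℓ + 1) p = List.replicate (ℓ + 1) v := by
      unfold tmpOf; rw [if_neg (by omega)]
    rw [ht, ht2]
    rw [if_neg (by simp; omega)]
    simp [List.replicate_succ']

lemma pairStep_flush (v x : String) (ℓ : Nat) (p : Bool) (seqs : List (String × Int × Int))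
    (hv : v ≠ pvEMPTY) (hxv : x ≠ v) (hℓ : 1 ≤ ℓ) :
    pairStep (seqs, tmpOf v ℓ p, opOf p) v x
      = (seqs ++ (if 2 ≤ ℓ then [(v, opOf p + (if x = pvEMPTY then 1 else 0), (ℓ : Int))] else []),
         [], 0) := by
  simp only [pairStep]
  by_cases hxe : x = pvEMPTY
  · rw [if_neg (by simpa using hxe), if_pos (fun h => hv (h.trans hxe))]
    by_cases h2 : 2 ≤ ℓ
    · rw [tmpOf_big v ℓ p h2]
      rw [if_pos (by simp; omega)]
      have hg : PySem.List.pyGetD (List.replicate ℓ v) 0 "" = v := by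
        obtain ⟨k, rfl⟩ : ∃ k, ℓ = k + 1 := ⟨ℓ - 1, by omega⟩
        rw [List.replicate_succ]
        simp [PySem.List.pyGetD_zero_cons]
      rw [hg]
      simp [hxe, h2]
    · rw [if_neg (by have := length_tmpOf_le v ℓ p (by omega); omega)]
      rw [if_neg h2]
      simp
  · rw [if_pos hxe, if_pos (fun h => hxv h.symm), if_neg hv]
    by_cases h2 : 2 ≤ ℓ
    · rw [tmpOf_big v ℓ p h2]
      rw [if_pos (by simp; omega)]
      have hg : PySem.List.pyGetD (List.replicate ℓ v) 0 "" = v := by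
        obtain ⟨k, rfl⟩ : ∃ k, ℓ = k + 1 := ⟨ℓ - 1, by omega⟩
        rw [List.replicate_succ]
        simp [PySem.List.pyGetD_zero_cons]
      rw [hg]
      simp [hxe, h2]
    · rw [if_neg (by have := length_tmpOf_le v ℓ p (by omega); omega)]
      rw [if_neg h2]
      simp

lemma emit_cond (v : String) (ℓ : Nat) (hv : v ≠ pvEMPTY) (o : Int) :
    (if v ≠ pvEMPTY ∧ (ℓ : Int) ≥ 2 then [(v, o, (ℓ : Int))] else [])
      = (if 2 ≤ ℓ then [(v, o, (ℓ : Int))] else []) := by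
  by_cases h2 : 2 ≤ ℓ
  · rw [if_pos ⟨hv, by omega⟩, if_pos h2]
  · rw [if_neg (fun hc => h2 (by exact_mod_cast hc.2)), if_neg h2]

lemma main_joint (rest : List String) :
    (∀ (v : String) (ℓ : Nat) (p : Bool) (seqs), v ≠ pvEMPTY → 1 ≤ ℓ →
      finishA (loopA (seqs, tmpOf v ℓ p, opOf p) v rest)
        = seqs ++ emitRec p (buildRuns v (ℓ : Int) rest))
    ∧ (∀ (m : Int) (b : Bool) (seqs),
      finishA (loopA (seqs, [], 0) pvEMPTY rest) = seqs ++ emitRec b (buildRuns pvEMPTY m rest)) := by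
  induction rest with
  | nil =>
    constructor
    · intro v ℓ p seqs hv hℓ
      rw [loopA, buildRuns, emitRec, emitRec]
      rw [show headIsEmpty [] = false from rfl]
      simp only [Bool.false_eq_true, if_false, add_zero, List.append_nil]
      rw [emit_cond v ℓ hv]
      by_cases h2 : 2 ≤ ℓ
      · rw [tmpOf_big v ℓ p h2, finishA_replicate seqs v ℓ _ h2, if_pos h2]
        rfl
      · rw [finishA_small _ _ _ (length_tmpOf_le v ℓ p (by omega)), if_neg h2]
        simp
    · intro m b seqs
      rw [loopA, buildRuns, emitRec, emitRec]
      rw [finishA_small _ _ _ (by simp)]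
      simp
  | cons x rest ih =>
    obtain ⟨ihA, ihB⟩ := ih
    constructor
    · -- prev = v ≠ EMPTY, trailing run of length ℓ
      intro v ℓ p seqs hv hℓ
      rw [loopA]
      by_cases hxv : x = v
      · -- run continues
        subst hxv
        rw [pairStep_extend x ℓ p seqs (opOf p) hv hℓ]
        rw [ihA x (ℓ + 1) p seqs hv (by omega)]
        rw [buildRuns, if_pos rfl]
        norm_num
      · -- run ends
        rw [pairStep_flush v x ℓ p seqs hv (fun h => hxv h) hℓ]
        rw [show buildRuns v (ℓ : Int) (x :: rest) = (v, (ℓ : Int)) :: buildRuns x 1 rest by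
          rw [buildRuns, if_neg (fun h => hxv (Eq.symm h))]]
        rw [emitRec, headIsEmpty_buildRuns]
        by_cases hxe : x = pvEMPTY
        · subst hxe
          rw [if_pos (rfl : pvEMPTY = pvEMPTY)]
          rw [ihB 1 false (seqs ++ (if 2 ≤ ℓ then [(v, opOf p + 1, (ℓ : Int))] else []))]
          rw [emit_cond v ℓ hv, show (v == pvEMPTY) = false by simp [hv], List.append_assoc]
          simp [opOf]
        · rw [show (x == pvEMPTY) = false by simp [hxe]]
          have := ihA x 1 false
            (seqs ++ (if 2 ≤ ℓ then [(v, opOf p + 0, (ℓ : Int))] else [])) hxe (by omega)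
          rw [show tmpOf x 1 false = [] from rfl] at this
          rw [show opOf false = (0 : Int) from rfl] at this
          rw [show (if x = pvEMPTY then (1 : Int) else 0) = 0 by rw [if_neg hxe]]
          rw [this]
          rw [emit_cond v ℓ hv]
          simp [opOf, show (v == pvEMPTY) = false by simp [hv]]
    · -- prev = EMPTY, empty buffer
      intro m b seqs
      rw [loopA]
      by_cases hxe : x = pvEMPTY
      · subst hxe
        have hstep : pairStep (seqs, [], 0) pvEMPTY pvEMPTY = (seqs, [], 0) := by
          simp [pairStep]
        rw [hstep, ihB (m + 1) b seqs, buildRuns, if_pos rfl]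
      · have hstep : pairStep (seqs, [], 0) pvEMPTY x = (seqs, [x], 1) := by
          have h' : ¬ pvEMPTY = x := fun h => hxe (Eq.symm h)
          simp [pairStep, hxe, h']
        rw [hstep]
        rw [show ((seqs, [x], (1 : Int)) : List (String × Int × Int) × List String × Int)
              = (seqs, tmpOf x 1 true, opOf true) from rfl]
        rw [ihA x 1 true seqs hxe (by omega)]
        rw [show buildRuns pvEMPTY m (x :: rest) = (pvEMPTY, m) :: buildRuns x 1 rest by
          rw [buildRuns, if_neg (fun h => hxe (Eq.symm h))]]
        rw [emitRec]
        simp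

-- ===== VERDICT (by name: the statement is the Claim_ definition above) =====
theorem get_sequences_in_array_spec : Claim_equal_get_sequences_in_array := by
  intro array _
  unfold Spec_get_sequences_in_array
  cases array with
  | nil => simp [get_sequences_in_array, get_sequences_in_array_alt, PySem.List.enumerate]
  | cons a0 rest =>
    rw [A_cons, B_cons]
    by_cases h : a0 = pvEMPTY
    · subst h; exact (main_joint rest).2 1 false []
    · have := (main_joint rest).1 a0 1 false [] h (by omega)
      simpa [tmpOf, opOf] using this
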